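-- pv_equiv track=rewrite | github.com/Co-Messi/autoconstitution | codebase/autoconstitution/benchmark/tdd_loop.py | _extract_failure_text
-- ===== SOURCE A (Python) =====
-- def _extract_failure_text(output: str) -> str:
--     """Pull the FAILURES section out of pytest -v --tb=short output.
--
--     Small models do better with tight, structured feedback than with a
--     full traceback, so we return the tail of the FAILURES block capped at
--     ~1200 chars.
--     """
--     lines = output.splitlines()
--     start: int | None = None
--     for i, line in enumerate(lines):
--         if "FAILURES" in line and line.strip().startswith("="):
--             start = i
--             break
--     if start is None:
--         # No structured failures — fall back to a tail of stdout.
--         return _truncate(output, 800)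
--     # End at the short summary section or end of file.
--     end = len(lines)
--     for i in range(start + 1, len(lines)):
--         if lines[i].strip().startswith("="):
--             end = i
--             break
--     block = "\n".join(lines[start:end]).strip()
--     return _truncate(block, 1200)
--
-- def _truncate(text: str, limit: int) -> str:
--     return text if len(text) <= limit else text[: limit - 1] + "…"
-- ===== SOURCE B (Python) =====
-- def _truncate(text: str, limit: int) -> str:
--     return text if len(text) <= limit else text[: limit - 1] + "…"
--
--
-- def _extract_failure_text(output: str) -> str:
--     """One-pass state machine: stream the lines, start accumulating when the
--     FAILURES banner arrives, stop at the next banner — no indices, no slicing."""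
--     block: list[str] | None = None
--     for line in output.splitlines():
--         if block is None:
--             if "FAILURES" in line and line.strip().startswith("="):
--                 block = [line]
--         elif line.strip().startswith("="):
--             break
--         else:
--             block.append(line)
--     if block is None:
--         return _truncate(output, 800)
--     return _truncate("\n".join(block).strip(), 1200)
-- ===== Notes on version B (the rewrite author's own statement) =====
-- stated objective: alternative
-- what changed: A finds the start index, then scans again for an end index and slices/joins; B is a single-pass state machine over the line stream that switches into an accumulating state at the FAILURES banner and stops at the next banner, never computing indices or slicing.
import Mathlib
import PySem

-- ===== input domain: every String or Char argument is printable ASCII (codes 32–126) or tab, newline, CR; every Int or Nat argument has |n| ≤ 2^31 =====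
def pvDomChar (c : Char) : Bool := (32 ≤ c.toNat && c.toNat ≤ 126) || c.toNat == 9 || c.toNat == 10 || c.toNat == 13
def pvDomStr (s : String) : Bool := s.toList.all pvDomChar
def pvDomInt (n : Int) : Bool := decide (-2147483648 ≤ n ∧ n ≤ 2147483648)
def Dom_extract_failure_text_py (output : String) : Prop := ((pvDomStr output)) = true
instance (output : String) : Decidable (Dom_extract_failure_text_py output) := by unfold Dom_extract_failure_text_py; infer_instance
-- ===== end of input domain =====

-- B replaces A's index-based two-scan-and-slice by a single-pass state machine that accumulates the block lines directly (alternative decomposition, same cost).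

-- shared module helper _truncate (identical in both Pythons)
def pyTruncate (text : String) (limit : Int) : String :=
  if PySem.Str.len text ≤ limit then text
  else PySem.Str.slice text none (some (limit - 1)) ++ "…"

-- ===== PORT A =====
-- the 'for i, line in enumerate(lines): … break' loop
def pvFindStartA : List String → Nat → Option Nat
  | [], _ => none
  | l :: ls, i =>
    if PySem.Str.isIn "FAILURES" l && PySem.Str.startswith (PySem.Str.strip l) "=" then some i
    else pvFindStartA ls (i + 1)

-- the 'for i in range(start + 1, len(lines)): … break' loop (end defaults to len(lines))
def pvFindEndA (lines : List String) (i : Nat) : Nat :=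
  if _h : i < lines.length then
    if PySem.Str.startswith (PySem.Str.strip (lines.getD i "")) "=" then i
    else pvFindEndA lines (i + 1)
  else lines.length
termination_by lines.length - i

def extract_failure_text_py (output : String) : String :=
  let lines := PySem.Str.splitlines output
  match pvFindStartA lines 0 with
  | none => pyTruncate output 800
  | some start =>
    let e := pvFindEndA lines (start + 1)
    pyTruncate (PySem.Str.strip (PySem.Str.join "\n"
      (PySem.List.slice lines (some (start : Int)) (some (e : Int))))) 1200

-- ===== PORT B =====
-- the loop's accumulating state: block is a list, append until a boundary line, then break
def pvCollectB : List String → List String → List String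
  | [], acc => acc
  | l :: ls, acc =>
    if PySem.Str.startswith (PySem.Str.strip l) "=" then acc
    else pvCollectB ls (acc ++ [l])

-- the loop's searching state: block is None until the FAILURES banner arrives
def pvScanB : List String → Option (List String)
  | [] => none
  | l :: ls =>
    if PySem.Str.isIn "FAILURES" l && PySem.Str.startswith (PySem.Str.strip l) "=" then
      some (pvCollectB ls [l])
    else pvScanB ls

def extract_failure_text_py_alt (output : String) : String :=
  match pvScanB (PySem.Str.splitlines output) with
  | none => pyTruncate output 800
  | some block => pyTruncate (PySem.Str.strip (PySem.Str.join "\n" block)) 1200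

-- ===== PRECONDITION & SPEC =====
def Spec_extract_failure_text_py (output : String) (out : String) : Prop := out = extract_failure_text_py_alt output
instance (output : String) (out : String) : Decidable (Spec_extract_failure_text_py output out) := by unfold Spec_extract_failure_text_py; infer_instance

-- ===== CLAIM (what is proved, stated in full; the proofs are below) =====
def Claim_equal_extract_failure_text_py : Prop := ∀ (output : String), Dom_extract_failure_text_py output → Spec_extract_failure_text_py output (extract_failure_text_py output)

-- ===== LEMMAS AND PROOFS =====

-- proof-side relative position of the FAILURES banner line
def pvFindRel : List String → Option Nat
  | [] => none
  | l :: ls =>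
    if PySem.Str.isIn "FAILURES" l && PySem.Str.startswith (PySem.Str.strip l) "=" then some 0
    else (pvFindRel ls).map (· + 1)

theorem findStartA_eq_rel (ls : List String) (i : Nat) :
    pvFindStartA ls i = (pvFindRel ls).map (i + ·) := by
  induction ls generalizing i with
  | nil => rfl
  | cons l ls ih =>
    simp only [pvFindStartA, pvFindRel]
    split
    · simp
    · rw [ih (i + 1)]
      cases pvFindRel ls with
      | none => simp
      | some x => simp; omega

theorem scanB_of_rel_none (ls : List String) (h : pvFindRel ls = none) : pvScanB ls = none := by
  induction ls with
  | nil => rfl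
  | cons l ls ih =>
    simp only [pvFindRel] at h
    simp only [pvScanB]
    by_cases hc : (PySem.Str.isIn "FAILURES" l && PySem.Str.startswith (PySem.Str.strip l) "=") = true
    · rw [if_pos hc] at h; cases h
    · rw [if_neg hc] at h
      rw [if_neg hc]
      exact ih (by cases hh : pvFindRel ls <;> simp [hh] at h ⊢)

theorem scanB_of_rel_some (ls : List String) (k : Nat) (h : pvFindRel ls = some k) :
    k < ls.length ∧ pvScanB ls = some (pvCollectB (ls.drop (k + 1)) [ls.getD k ""]) := by
  induction ls generalizing k with
  | nil => simp [pvFindRel] at h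
  | cons l ls ih =>
    simp only [pvFindRel] at h
    simp only [pvScanB]
    by_cases hc : (PySem.Str.isIn "FAILURES" l && PySem.Str.startswith (PySem.Str.strip l) "=") = true
    · rw [if_pos hc] at h
      injection h with h
      subst h
      exact ⟨by simp, by rw [if_pos hc]; rfl⟩
    · rw [if_neg hc] at h
      rw [if_neg hc]
      cases hh : pvFindRel ls with
      | none => simp [hh] at h
      | some k' =>
        rw [hh] at h
        simp only [Option.map_some, Option.some.injEq] at h
        subst h
        obtain ⟨h1, h2⟩ := ih k' hh
        exact ⟨by simpa using Nat.succ_lt_succ h1, by simpa using h2⟩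

-- the collecting state appends exactly the non-boundary prefix
theorem collectB_eq (ls acc : List String) :
    pvCollectB ls acc = acc ++ ls.takeWhile (fun l => !(PySem.Str.startswith (PySem.Str.strip l) "=")) := by
  induction ls generalizing acc with
  | nil => simp [pvCollectB]
  | cons l ls ih =>
    by_cases hb : PySem.Chars.startswith (PySem.Chars.strip l.toList) ['='] = true
    · simp [pvCollectB, List.takeWhile, hb]
    · simp [pvCollectB, List.takeWhile, hb, ih]

-- proof-side structural form of A's end loop
def pvAuxE : List String → Nat → Nat
  | [], i => i
  | l :: ls, i => if PySem.Str.startswith (PySem.Str.strip l) "=" then i else pvAuxE ls (i + 1)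

theorem findEndA_eq_auxE (ls : List String) (full : List String) (i : Nat)
    (hle : i ≤ full.length) (hdrop : full.drop i = ls) :
    pvFindEndA full i = pvAuxE ls i := by
  induction ls generalizing i with
  | nil =>
    have : full.length ≤ i := by
      have := List.drop_eq_nil_iff.mp hdrop; omega
    rw [pvFindEndA]
    simp [pvAuxE, Nat.not_lt.mpr this]; omega
  | cons l ls ih =>
    have hi : i < full.length := by
      by_contra h
      rw [List.drop_eq_nil_iff.mpr (by omega)] at hdrop
      exact List.cons_ne_nil _ _ hdrop.symm
    have hget : full[i]? = some l := by
      have : (full.drop i)[0]? = some l := by rw [hdrop]; rfl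
      simpa [List.getElem?_drop] using this
    have hgetD : full.getD i "" = l := by
      simp [List.getD, hget]
    have hdrop' : full.drop (i + 1) = ls := by
      have : (full.drop i).tail = ls := by rw [hdrop]; rfl
      simpa [List.tail_drop] using this
    rw [pvFindEndA]
    simp only [hi, dif_pos, hgetD, pvAuxE]
    split
    · rfl
    · exact ih (i + 1) (by omega) hdrop'

theorem auxE_len (ls : List String) (i : Nat) :
    pvAuxE ls i = i + (ls.takeWhile (fun l => !(PySem.Str.startswith (PySem.Str.strip l) "="))).length := by
  induction ls generalizing i with
  | nil => simp [pvAuxE]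
  | cons l ls ih =>
    by_cases hb : PySem.Chars.startswith (PySem.Chars.strip l.toList) ['='] = true
    · simp [pvAuxE, List.takeWhile, hb]
    · simp [pvAuxE, List.takeWhile, hb, ih]
      omega

-- ===== VERDICT (by name: the statement is the Claim_ definition above) =====
theorem extract_failure_text_py_spec : Claim_equal_extract_failure_text_py := by
  intro output _
  unfold Spec_extract_failure_text_py extract_failure_text_py extract_failure_text_py_alt
  simp only [findStartA_eq_rel]
  cases hr : pvFindRel (PySem.Str.splitlines output) with
  | none =>
    rw [scanB_of_rel_none _ hr]
    simp
  | some k =>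
    obtain ⟨hk, hscan⟩ := scanB_of_rel_some _ k hr
    rw [hscan]
    simp only [Option.map_some, Nat.zero_add]
    set lines := PySem.Str.splitlines output with hlines
    have hdropk : lines.drop k = lines[k] :: lines.drop (k + 1) :=
      List.drop_eq_getElem_cons hk
    have hgetD : lines.getD k "" = lines[k] := by
      simp [List.getD, List.getElem?_eq_getElem hk]
    have hend : pvFindEndA lines (k + 1)
        = (k + 1) + ((lines.drop (k + 1)).takeWhile
            (fun l => !(PySem.Str.startswith (PySem.Str.strip l) "="))).length := by
      rw [findEndA_eq_auxE (lines.drop (k + 1)) lines (k + 1) (by omega) rfl, auxE_len]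
    set t := ((lines.drop (k + 1)).takeWhile
        (fun l => !(PySem.Str.startswith (PySem.Str.strip l) "="))).length with ht
    have hslice : PySem.List.slice lines (some (k : Int)) (some ((pvFindEndA lines (k + 1) : Nat) : Int))
        = lines[k] :: (lines.drop (k + 1)).takeWhile
            (fun l => !(PySem.Str.startswith (PySem.Str.strip l) "=")) := by
      rw [hend, PySem.List.slice_natCast]
      have : k + 1 + t - k = t + 1 := by omega
      rw [this, hdropk, List.take_succ_cons]
      congr 1
      exact (List.prefix_iff_eq_take.mp (List.takeWhile_prefix _)).symm
    rw [hslice, collectB_eq, hgetD, List.singleton_append]
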